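-- pv_equiv track=rewrite | github.com/ilaydaylmz/sifrelemeUygulamasi | sifrelemeUygulamasi/kendialgoritmamiz.py | kendi_coz
-- ===== SOURCE A (Python) =====
-- def kendi_coz(sifreli_metin, a, b):
--     sifre_metin=""
--     for karak in sifreli_metin:
--         if karak.isalpha():
--             buyuk_harf = karak.isupper()
--             karak_sira = ord(karak.upper()) - ord('A')
--             sifre_sira = 25- karak_sira
--             sifre_karak = chr(sifre_sira + ord('A'))
--             if buyuk_harf:
--                 sifre_metin += sifre_karak
--             else:
--                 sifre_metin += sifre_karak.lower()
--         else:
--             sifre_metin += karak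
--
--     y= sifre_metin
--     z = str(y)[::-1]
--     mod_tersi = pow(a, -1, 26)  # a'nın modüler tersini hesapla
--     orjinal_metin = ""
--     for karakter in z:
--         if karakter.isalpha():
--             buyuk_harf = karakter.isupper()
--             karakter_sira = ord(karakter.upper()) - ord('A')
--             orjinal_sira = (mod_tersi * (karakter_sira - b)) % 26
--             orjinal_karakter = chr(orjinal_sira + ord('A'))
--             if buyuk_harf:
--                 orjinal_metin += orjinal_karakter
--             else:
--                 orjinal_metin += orjinal_karakter.lower()
--         else:
--             orjinal_metin += karakter
--     return orjinal_metin
-- ===== SOURCE B (Python) =====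
-- def _coz_karak(c, mod_tersi, b):
--     if not c.isalpha():
--         return c
--     sira = ord(c.upper()) - ord('A')
--     harf = chr((mod_tersi * ((25 - sira) - b)) % 26 + ord('A'))
--     return harf if c.isupper() else harf.lower()
--
-- def kendi_coz(sifreli_metin, a, b):
--     mod_tersi = pow(a, -1, 26)
--     return ''.join(_coz_karak(c, mod_tersi, b) for c in reversed(sifreli_metin))
-- ===== Notes on version B (the rewrite author's own statement) =====
-- stated objective: simpler
-- what changed: B fuses A's two per-character passes and intermediate complemented buffer into a single composed map over the reversed string, computing the inverse (25 - rank - b) * a^-1 mod 26 per character in one pass.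
import Mathlib
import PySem

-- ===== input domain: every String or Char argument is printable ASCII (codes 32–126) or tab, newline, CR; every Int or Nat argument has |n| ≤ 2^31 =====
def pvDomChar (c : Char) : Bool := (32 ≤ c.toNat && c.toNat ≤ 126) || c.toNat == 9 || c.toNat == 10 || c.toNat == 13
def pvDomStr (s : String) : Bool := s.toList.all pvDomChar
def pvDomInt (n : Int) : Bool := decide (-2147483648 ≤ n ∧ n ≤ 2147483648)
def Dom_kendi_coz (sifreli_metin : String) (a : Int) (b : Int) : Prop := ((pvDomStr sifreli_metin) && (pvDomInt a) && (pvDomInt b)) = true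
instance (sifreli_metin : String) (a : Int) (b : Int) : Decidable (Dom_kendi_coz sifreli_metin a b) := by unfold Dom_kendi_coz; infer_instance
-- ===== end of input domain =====

-- B fuses A's two per-character passes (complement pass, then reverse, then affine-inverse
-- pass) into one composed map over the reversed string; objective: simpler (single pass, no
-- intermediate buffer).

-- Shared char primitives (exact on the ASCII domain Dom restricts to):
-- karak.isalpha()
def pyIsAlpha (c : Char) : Bool := (65 ≤ c.toNat && c.toNat ≤ 90) || (97 ≤ c.toNat && c.toNat ≤ 122)
-- karak.isupper() (for single chars)
def pyIsUpper (c : Char) : Bool := 65 ≤ c.toNat && c.toNat ≤ 90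
-- karak.upper() (single char)
def pyUpperChar (c : Char) : Char := if 97 ≤ c.toNat && c.toNat ≤ 122 then Char.ofNat (c.toNat - 32) else c
-- karak.lower() (single char)
def pyLowerChar (c : Char) : Char := if 65 ≤ c.toNat && c.toNat ≤ 90 then Char.ofNat (c.toNat + 32) else c
-- pow(a, -1, 26): hand-ported (PySem.Int.powMod takes a Nat exponent); exact wherever the
-- inverse exists (Pre_): Python returns the unique inverse in [0, 26).
def modInv26 (a : Int) : Int :=
  match (List.range 26).find? (fun x => PySem.Int.mod (a * (x : Int)) 26 == 1) with
  | some x => (x : Int)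
  | none => 0

-- ===== PORT A =====
def kendi_coz (sifreli_metin : String) (a : Int) (b : Int) : String :=
  let sifre_metin := sifreli_metin.toList.foldl (fun acc karak =>
    if pyIsAlpha karak then
      let buyuk_harf := pyIsUpper karak
      let karak_sira : Int := ((pyUpperChar karak).toNat : Int) - 65
      let sifre_sira := 25 - karak_sira
      let sifre_karak := Char.ofNat (sifre_sira.toNat + 65)
      if buyuk_harf then acc ++ [sifre_karak] else acc ++ [pyLowerChar sifre_karak]
    else acc ++ [karak]) []
  let z := sifre_metin.reverse
  let mod_tersi := modInv26 a
  let orjinal_metin := z.foldl (fun acc karakter =>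
    if pyIsAlpha karakter then
      let buyuk_harf := pyIsUpper karakter
      let karakter_sira : Int := ((pyUpperChar karakter).toNat : Int) - 65
      let orjinal_sira := PySem.Int.mod (mod_tersi * (karakter_sira - b)) 26
      let orjinal_karakter := Char.ofNat (orjinal_sira.toNat + 65)
      if buyuk_harf then acc ++ [orjinal_karakter] else acc ++ [pyLowerChar orjinal_karakter]
    else acc ++ [karakter]) []
  String.mk orjinal_metin

-- ===== PORT B =====
-- _coz_karak from Source B
def cozKarak (c : Char) (mod_tersi : Int) (b : Int) : Char :=
  if !pyIsAlpha c then c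
  else
    let sira : Int := ((pyUpperChar c).toNat : Int) - 65
    let harf := Char.ofNat ((PySem.Int.mod (mod_tersi * ((25 - sira) - b)) 26).toNat + 65)
    if pyIsUpper c then harf else pyLowerChar harf

def kendi_coz_alt (sifreli_metin : String) (a : Int) (b : Int) : String :=
  let mod_tersi := modInv26 a
  String.mk (sifreli_metin.toList.reverse.map (fun c => cozKarak c mod_tersi b))

-- ===== PRECONDITION & SPEC =====
-- Pre_ excludes exactly the inputs where pow(a, -1, 26) raises ValueError (a not invertible
-- mod 26); both A and B raise there.
def Pre_kendi_coz (sifreli_metin : String) (a : Int) (b : Int) : Prop := PySem.Int.mod a 2 ≠ 0 ∧ PySem.Int.mod a 13 ≠ 0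
instance (sifreli_metin : String) (a : Int) (b : Int) : Decidable (Pre_kendi_coz sifreli_metin a b) := by unfold Pre_kendi_coz; infer_instance
def pvWitness_kendi_coz : String × Int × Int := ("Merhaba, Dunya!", 3, 7)

def Spec_kendi_coz (sifreli_metin : String) (a : Int) (b : Int) (out : String) : Prop := out = kendi_coz_alt sifreli_metin a b
instance (sifreli_metin : String) (a : Int) (b : Int) (out : String) : Decidable (Spec_kendi_coz sifreli_metin a b out) := by unfold Spec_kendi_coz; infer_instance

-- ===== CLAIM (what is proved, stated in full; the proofs are below) =====
def Claim_equal_kendi_coz : Prop := ∀ (sifreli_metin : String) (a : Int) (b : Int), Dom_kendi_coz sifreli_metin a b → Pre_kendi_coz sifreli_metin a b → Spec_kendi_coz sifreli_metin a b (kendi_coz sifreli_metin a b)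

-- ===== LEMMAS AND PROOFS =====

-- A's first-pass per-character map (the complement cipher)
def fA1 (karak : Char) : Char :=
  if pyIsAlpha karak then
    let buyuk_harf := pyIsUpper karak
    let karak_sira : Int := ((pyUpperChar karak).toNat : Int) - 65
    let sifre_sira := 25 - karak_sira
    let sifre_karak := Char.ofNat (sifre_sira.toNat + 65)
    if buyuk_harf then sifre_karak else pyLowerChar sifre_karak
  else karak

-- A's second-pass per-character map (the affine inverse)
def fA2 (mod_tersi : Int) (b : Int) (karakter : Char) : Char :=
  if pyIsAlpha karakter then
    let buyuk_harf := pyIsUpper karakter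
    let karakter_sira : Int := ((pyUpperChar karakter).toNat : Int) - 65
    let orjinal_sira := PySem.Int.mod (mod_tersi * (karakter_sira - b)) 26
    let orjinal_karakter := Char.ofNat (orjinal_sira.toNat + 65)
    if buyuk_harf then orjinal_karakter else pyLowerChar orjinal_karakter
  else karakter

def upVal (c : Char) : Int := ((pyUpperChar c).toNat : Int) - 65

-- fA1 sends an alphabetic char to an alphabetic char of the same case with complemented rank
lemma fA1_props (c : Char) (h : pyIsAlpha c = true) :
    pyIsAlpha (fA1 c) = true ∧ pyIsUpper (fA1 c) = pyIsUpper c ∧ upVal (fA1 c) = 25 - upVal c := by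
  have hb : (65 ≤ c.toNat ∧ c.toNat ≤ 90) ∨ (97 ≤ c.toNat ∧ c.toNat ≤ 122) := by
    simp [pyIsAlpha] at h; omega
  rw [← Char.ofNat_toNat c]
  generalize c.toNat = n at hb
  rcases hb with ⟨h1, h2⟩ | ⟨h1, h2⟩ <;> interval_cases n <;> decide

lemma comp_char (m b : Int) (c : Char) : fA2 m b (fA1 c) = cozKarak c m b := by
  by_cases h : pyIsAlpha c = true
  · obtain ⟨h1, h2, h3⟩ := fA1_props c h
    have h3' : ((pyUpperChar (fA1 c)).toNat : Int) - 65 = 25 - (((pyUpperChar c).toNat : Int) - 65) := h3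
    simp only [fA2, cozKarak, h, h1, h2, h3', Bool.not_true, Bool.false_eq_true, if_false, if_true]
  · simp only [Bool.not_eq_true] at h
    simp [fA2, fA1, cozKarak, h]

lemma bodyA1_eq : (fun (acc : List Char) karak =>
    if pyIsAlpha karak then
      let buyuk_harf := pyIsUpper karak
      let karak_sira : Int := ((pyUpperChar karak).toNat : Int) - 65
      let sifre_sira := 25 - karak_sira
      let sifre_karak := Char.ofNat (sifre_sira.toNat + 65)
      if buyuk_harf then acc ++ [sifre_karak] else acc ++ [pyLowerChar sifre_karak]
    else acc ++ [karak]) = (fun acc karak => acc ++ [fA1 karak]) := by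
  funext acc karak
  simp only [fA1]
  split <;> [skip; rfl]
  split <;> rfl

lemma bodyA2_eq (m b : Int) : (fun (acc : List Char) karakter =>
    if pyIsAlpha karakter then
      let buyuk_harf := pyIsUpper karakter
      let karakter_sira : Int := ((pyUpperChar karakter).toNat : Int) - 65
      let orjinal_sira := PySem.Int.mod (m * (karakter_sira - b)) 26
      let orjinal_karakter := Char.ofNat (orjinal_sira.toNat + 65)
      if buyuk_harf then acc ++ [orjinal_karakter] else acc ++ [pyLowerChar orjinal_karakter]
    else acc ++ [karakter]) = (fun acc karakter => acc ++ [fA2 m b karakter]) := by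
  funext acc karakter
  simp only [fA2]
  split <;> [skip; rfl]
  split <;> rfl

-- ===== VERDICT (by name: the statement is the Claim_ definition above) =====
theorem kendi_coz_spec : Claim_equal_kendi_coz := by
  intro s a b _dom _pre
  unfold Spec_kendi_coz kendi_coz kendi_coz_alt
  simp only [bodyA1_eq, bodyA2_eq, PySem.List.foldl_append_singleton_eq_map, List.nil_append,
    ← List.map_reverse, List.map_map]
  congr 1
  apply List.map_congr_left
  intro c _
  exact comp_char (modInv26 a) b c
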